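-- pv_equiv track=rewrite | github.com/TIMHX/DSC-20---Prgrmng-DataStruc-for-Data-Sc---Archive | HW/hw06.py | recursive_reverse_up_to_n
-- ===== SOURCE A (Python) =====
-- def recursive_reverse_up_to_n(name, n):
--     """
--     Recursively reverses the given string at chunks 1..n
--
--     Restrictions:
--     You should use recursion. You should do input validation.
--
--     Parameters:
--     name (str): The string to be reversed
--     n (int): How many times the string should be reversed
--
--     Returns:
--     (str) Reversed string with the given formula
--
--     >>> recursive_reverse_up_to_n('Nabi', 3)
--     'bNai'
--     >>> recursive_reverse_up_to_n('klmn', 3)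
--     'mkln'
--     >>> recursive_reverse_up_to_n('klmn', 4)
--     'nlkm'
--
--     +++++++++++++++++++++++++
--     WRITE YOUR DOCTESTS BELOW
--     +++++++++++++++++++++++++
--     >>> recursive_reverse_up_to_n('123456', 3)
--     '312456'
--     >>> recursive_reverse_up_to_n('123456', 9)
--     Traceback (most recent call last):
--     ...
--     AssertionError
--     >>> recursive_reverse_up_to_n(1, 9)
--     Traceback (most recent call last):
--     ...
--     AssertionError
--     """
--     assert isinstance(name, str)
--     assert isinstance(n, int)
--     assert n <= len(name)
--     if n == 0:
--         return name
--     return recursive_reverse_up_to_n(name, n - 1)[:n][::-1] + \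
--         recursive_reverse_up_to_n(name, n - 1)[n:]
-- ===== SOURCE B (Python) =====
-- def recursive_reverse_up_to_n(name, n):
--     assert isinstance(name, str)
--     assert isinstance(n, int)
--     assert n <= len(name)
--     s = name
--     for k in range(1, n + 1):
--         s = s[:k][::-1] + s[k:]
--     return s
-- ===== Notes on version B (the rewrite author's own statement) =====
-- stated objective: faster
-- what changed: Replaces the double-recursive descent, which recomputes the n-1 sub-result twice, by a single forward loop applying reverse-prefix-k for k = 1..n; intended as faster (asymptotic): in a timing run A timed out at n=64 where B returned, and at the largest size both finished B measured 3.79x.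
import Mathlib
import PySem

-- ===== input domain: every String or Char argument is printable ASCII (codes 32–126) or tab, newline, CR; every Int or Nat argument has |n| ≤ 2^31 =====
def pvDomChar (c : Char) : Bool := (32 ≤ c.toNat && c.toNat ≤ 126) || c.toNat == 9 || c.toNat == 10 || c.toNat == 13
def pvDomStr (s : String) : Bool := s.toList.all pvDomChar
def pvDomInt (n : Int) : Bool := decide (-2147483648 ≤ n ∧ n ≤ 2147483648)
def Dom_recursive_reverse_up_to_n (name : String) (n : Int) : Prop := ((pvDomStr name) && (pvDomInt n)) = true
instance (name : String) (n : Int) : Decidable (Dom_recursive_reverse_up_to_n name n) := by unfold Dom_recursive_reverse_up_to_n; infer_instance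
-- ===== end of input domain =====

-- B replaces A's double recursion (exponential in n) by one forward loop over k = 1..n; return values proved equal on Pre_.

-- ===== PORT A =====
-- A recurses on n (Pre_ gives 0 ≤ n, so recursion is on n.toNat); the two identical
-- recursive calls of the Python are kept as two calls. s[:k][::-1] is reverse of the
-- clamped prefix (exact per PySem.List.slice?_none_none_neg_one / slice_to_natCast).
def pvARec (cs : List Char) : Nat → List Char
  | 0 => cs
  | Nat.succ m =>
      (PySem.List.slice (pvARec cs m) none (some ((m : Int) + 1))).reverse ++
      PySem.List.slice (pvARec cs m) (some ((m : Int) + 1)) none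

def recursive_reverse_up_to_n (name : String) (n : Int) : String :=
  String.ofList (pvARec name.toList n.toNat)

-- ===== PORT B =====
def recursive_reverse_up_to_n_alt (name : String) (n : Int) : String :=
  String.ofList <|
    (PySem.List.pyRange 1 (n + 1) 1).foldl
      (fun s k => (PySem.List.slice s none (some k)).reverse ++ PySem.List.slice s (some k) none)
      name.toList

-- ===== PRECONDITION & SPEC =====
-- Pre_ excludes exactly the inputs where A raises: n > len(name) (AssertionError) and n < 0 (RecursionError).
def Pre_recursive_reverse_up_to_n (name : String) (n : Int) : Prop :=
  0 ≤ n ∧ n ≤ PySem.Str.len name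
instance (name : String) (n : Int) : Decidable (Pre_recursive_reverse_up_to_n name n) := by unfold Pre_recursive_reverse_up_to_n; infer_instance

def pvWitness_recursive_reverse_up_to_n : String × Int := ("klmn", 3)

def Spec_recursive_reverse_up_to_n (name : String) (n : Int) (out : String) : Prop := out = recursive_reverse_up_to_n_alt name n
instance (name : String) (n : Int) (out : String) : Decidable (Spec_recursive_reverse_up_to_n name n out) := by unfold Spec_recursive_reverse_up_to_n; infer_instance

-- ===== CLAIM (what is proved, stated in full; the proofs are below) =====
def Claim_equal_recursive_reverse_up_to_n : Prop := ∀ (name : String) (n : Int), Dom_recursive_reverse_up_to_n name n → Pre_recursive_reverse_up_to_n name n → Spec_recursive_reverse_up_to_n name n (recursive_reverse_up_to_n name n)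

-- ===== LEMMAS AND PROOFS =====
lemma pvFold_eq_pvARec (cs : List Char) (m : Nat) :
    (PySem.List.pyRange 1 ((m : Int) + 1) 1).foldl
      (fun s k => (PySem.List.slice s none (some k)).reverse ++ PySem.List.slice s (some k) none)
      cs = pvARec cs m := by
  induction m with
  | zero =>
      simp only [Nat.cast_zero, zero_add]
      rw [PySem.List.pyRange_one_eq_nil le_rfl]
      rfl
  | succ m ih =>
      rw [show ((m + 1 : Nat) : Int) + 1 = ((m : Int) + 1) + 1 by push_cast; ring,
          PySem.List.pyRange_one_succ_right (by omega), List.foldl_append, ih]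
      simp [pvARec]

-- ===== VERDICT (by name: the statement is the Claim_ definition above) =====
theorem recursive_reverse_up_to_n_spec : Claim_equal_recursive_reverse_up_to_n := by
  intro name n _ hpre
  obtain ⟨h0, _⟩ := hpre
  have hn : n = ((n.toNat : Nat) : Int) := (Int.toNat_of_nonneg h0).symm
  show _ = _
  unfold recursive_reverse_up_to_n recursive_reverse_up_to_n_alt
  rw [hn, pvFold_eq_pvARec, Int.toNat_natCast]
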